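-- pv_equiv track=rewrite | github.com/dcaponi/agentic-app-spec | runtime/python/agentic_engine/resolver.py | _tokenize_path
-- ===== SOURCE A (Python) =====
-- def _tokenize_path(path: str) -> list[str]:
--     """Split a dotted path, handling array indices like ``output[0]``.
--
--     ``steps.fetch.output[0].name`` -> ``["steps", "fetch", "output", "[0]", "name"]``
--     """
--     tokens: list[str] = []
--     for part in path.split("."):
--         if not part:
--             continue
--         idx = part.find("[")
--         if idx != -1:
--             field = part[:idx]
--             if field:
--                 tokens.append(field)
--             tokens.append(part[idx:])  # e.g. "[0]"
--         else:
--             tokens.append(part)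
--     return tokens
-- ===== SOURCE B (Python) =====
-- def _tokenize_path(path: str) -> list[str]:
--     """Single-pass scanner: field state vs bracket state, no split/find."""
--     tokens: list[str] = []
--     buf = ""
--     in_bracket = False
--     for ch in path:
--         if in_bracket:
--             if ch == ".":
--                 tokens.append(buf)
--                 buf = ""
--                 in_bracket = False
--             else:
--                 buf += ch
--         else:
--             if ch == ".":
--                 if buf:
--                     tokens.append(buf)
--                 buf = ""
--             elif ch == "[":
--                 if buf:
--                     tokens.append(buf)
--                 buf = "["
--                 in_bracket = True
--             else:
--                 buf += ch
--     if buf: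
--         tokens.append(buf)
--     return tokens
-- ===== Notes on version B (the rewrite author's own statement) =====
-- stated objective: alternative
-- what changed: Replaced split('.') + find('[') + slicing per part with a single-pass character scanner holding a buffer and a field/bracket state flag.
import Mathlib
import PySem

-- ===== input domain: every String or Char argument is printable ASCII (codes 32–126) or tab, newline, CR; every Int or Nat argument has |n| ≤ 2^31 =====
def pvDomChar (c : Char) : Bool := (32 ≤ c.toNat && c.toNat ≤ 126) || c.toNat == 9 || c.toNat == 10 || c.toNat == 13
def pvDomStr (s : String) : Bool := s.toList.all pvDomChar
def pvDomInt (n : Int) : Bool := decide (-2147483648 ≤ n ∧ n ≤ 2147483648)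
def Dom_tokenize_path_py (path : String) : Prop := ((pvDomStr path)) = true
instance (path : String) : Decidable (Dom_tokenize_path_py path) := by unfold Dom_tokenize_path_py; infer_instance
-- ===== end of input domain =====

-- B replaces split('.') + find('[') + slicing with a one-pass two-state character scanner (alternative decomposition, same cost).

-- ===== PORT A =====
-- for part in path.split("."): skip empty; split at first '['; append field (if nonempty) and the bracket tail, else the part
def stepA (tokens : List (List Char)) (part : List Char) : List (List Char) :=
  if part.isEmpty then tokens
  else
    let idx := PySem.Chars.find part ['[']
    if idx ≠ -1 then
      (if (PySem.List.slice part none (some idx)).isEmpty then tokens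
       else tokens ++ [PySem.List.slice part none (some idx)]) ++
        [PySem.List.slice part (some idx) none]
    else tokens ++ [part]

def tokenize_path_py (path : String) : List String :=
  ((PySem.Chars.splitOn path.toList ['.']).foldl stepA []).map String.ofList

-- ===== PORT B =====
-- the scanner loop of Source B: buf is the current token text, inB says we are inside a bracket group
def scanB : List Char → List Char → Bool → List (List Char) → List (List Char)
  | [], buf, _, toks => if buf ≠ [] then toks ++ [buf] else toks
  | c :: rest, buf, inB, toks =>
    if inB then
      if c = '.' then scanB rest [] false (toks ++ [buf])
      else scanB rest (buf ++ [c]) true toks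
    else
      if c = '.' then scanB rest [] false (if buf ≠ [] then toks ++ [buf] else toks)
      else if c = '[' then scanB rest ['['] true (if buf ≠ [] then toks ++ [buf] else toks)
      else scanB rest (buf ++ [c]) false toks

def tokenize_path_py_alt (path : String) : List String :=
  (scanB path.toList [] false []).map String.ofList

-- ===== PRECONDITION & SPEC =====
def Spec_tokenize_path_py (path : String) (out : List String) : Prop := out = tokenize_path_py_alt path
instance (path : String) (out : List String) : Decidable (Spec_tokenize_path_py path out) := by unfold Spec_tokenize_path_py; infer_instance

-- ===== CLAIM (what is proved, stated in full; the proofs are below) =====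
def Claim_equal_tokenize_path_py : Prop := ∀ (path : String), Dom_tokenize_path_py path → Spec_tokenize_path_py path (tokenize_path_py path)

-- ===== LEMMAS AND PROOFS =====

-- simple recursion computing splitOn s ['.'] (cur kept in order)
def dotSplit : List Char → List Char → List (List Char)
  | [], cur => [cur]
  | c :: rest, cur => if c = '.' then cur :: dotSplit rest [] else dotSplit rest (cur ++ [c])

-- A's per-part token list
def procA (part : List Char) : List (List Char) :=
  if part.isEmpty then []
  else
    let idx := PySem.Chars.find part ['[']
    if idx ≠ -1 then
      (if (PySem.List.slice part none (some idx)).isEmpty then []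
       else [PySem.List.slice part none (some idx)]) ++
        [PySem.List.slice part (some idx) none]
    else [part]

theorem splitOn_eq_dotSplit_aux : ∀ (fuel : Nat) (l cur : List Char) (acc : List (List Char)),
    l.length < fuel →
    PySem.Chars.splitOn.go ['.'] fuel l cur acc = acc.reverse ++ dotSplit l cur.reverse := by
  intro fuel
  induction fuel with
  | zero => intro l cur acc h; omega
  | succ fuel ih =>
    intro l cur acc h
    cases l with
    | nil => simp [PySem.Chars.splitOn.go, dotSplit]
    | cons c rest =>
      by_cases hc : c = '.'
      · subst hc
        have hp : (['.'].isPrefixOf ('.' :: rest)) = true := by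
          simp [List.isPrefixOf]
        simp only [PySem.Chars.splitOn.go, hp, if_true, List.length_singleton,
          List.drop_succ_cons, List.drop_zero]
        rw [ih rest [] (cur.reverse :: acc) (by simp at h ⊢; omega)]
        simp [dotSplit]
      · have hp : (['.'].isPrefixOf (c :: rest)) = false := by
          simp [List.isPrefixOf]
          first
          | exact fun hh => hc hh
          | exact fun hh => hc hh.symm
        simp only [PySem.Chars.splitOn.go, hp, Bool.false_eq_true, if_false]
        rw [ih rest (c :: cur) acc (by simp at h ⊢; omega)]
        simp [dotSplit, hc]

theorem splitOn_eq_dotSplit (s : List Char) :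
    PySem.Chars.splitOn s ['.'] = dotSplit s [] := by
  have := splitOn_eq_dotSplit_aux (s.length + 1) s [] [] (by omega)
  simpa [PySem.Chars.splitOn] using this

-- find.go for the single-char pattern '['
theorem findGo_bracket : ∀ (l : List Char) (k : Nat), '[' ∉ l →
    PySem.Chars.find.go ['['] l k = -1 := by
  intro l
  induction l with
  | nil => intro k _; simp [PySem.Chars.find.go]
  | cons c rest ih =>
    intro k h
    simp only [List.mem_cons, not_or] at h
    simp only [PySem.Chars.find.go]
    have hp : (['['].isPrefixOf (c :: rest)) = false := by
      simp [List.isPrefixOf]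
      first
      | exact fun hh => h.1 hh
      | exact fun hh => h.1 hh.symm
    rw [hp]
    simpa using ih (k + 1) h.2

theorem findGo_bracket_pos : ∀ (buf : List Char) (w : List Char) (k : Nat), '[' ∉ buf →
    PySem.Chars.find.go ['['] (buf ++ '[' :: w) k = (k : Int) + buf.length := by
  intro buf
  induction buf with
  | nil =>
    intro w k _
    simp [PySem.Chars.find.go, List.isPrefixOf]
  | cons c rest ih =>
    intro w k h
    simp only [List.mem_cons, not_or] at h
    simp only [List.cons_append, PySem.Chars.find.go]
    have hp : (['['].isPrefixOf (c :: (rest ++ '[' :: w))) = false := by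
      simp [List.isPrefixOf]
      first
      | exact fun hh => h.1 hh
      | exact fun hh => h.1 hh.symm
    rw [hp]
    simp only [Bool.false_eq_true, if_false]
    rw [ih w (k + 1) h.2]
    simp only [List.length_cons]
    push_cast; ring

theorem procA_no_bracket (p : List Char) (h : '[' ∉ p) :
    procA p = if p = [] then [] else [p] := by
  unfold procA
  have hf : PySem.Chars.find p ['['] = -1 := by
    simpa [PySem.Chars.find] using findGo_bracket p 0 h
  rcases p with _ | ⟨c, rest⟩
  · simp
  · simp [hf]

theorem procA_bracket (buf w : List Char) (h : '[' ∉ buf) :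
    procA (buf ++ '[' :: w) = (if buf = [] then [] else [buf]) ++ ['[' :: w] := by
  unfold procA
  have hf : PySem.Chars.find (buf ++ '[' :: w) ['['] = (buf.length : Int) := by
    simpa [PySem.Chars.find] using findGo_bracket_pos buf w 0 h
  have hne : (buf ++ '[' :: w).isEmpty = false := by
    simp [List.isEmpty_eq_false_iff]
  rw [hne]
  simp only [Bool.false_eq_true, if_false, hf]
  have h1 : PySem.List.slice (buf ++ '[' :: w) none (some (buf.length : Int)) = buf := by
    rw [PySem.List.slice_to _ (by positivity)]
    simp [List.take_left]
  have h2 : PySem.List.slice (buf ++ '[' :: w) (some (buf.length : Int)) none = '[' :: w := by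
    rw [PySem.List.slice_from _ (by positivity)]
    simp [List.drop_left]
  rw [if_pos (by omega : (buf.length : Int) ≠ -1), h1, h2]
  rcases buf with _ | ⟨c, rest⟩ <;> simp

-- first piece of dotSplit: everything up to the first '.'
theorem dotSplit_head (rest : List Char) : ∀ (cur : List Char),
    dotSplit rest cur =
      (cur ++ rest.takeWhile (· ≠ '.')) ::
        (match rest.dropWhile (· ≠ '.') with
          | [] => []
          | _ :: v => dotSplit v []) := by
  induction rest with
  | nil => intro cur; simp [dotSplit]
  | cons c v ih =>
    intro cur
    by_cases hc : c = '.'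
    · subst hc; simp [dotSplit, List.takeWhile, List.dropWhile]
    · simp only [dotSplit, if_neg hc]
      rw [ih (cur ++ [c])]
      simp [List.takeWhile_cons, List.dropWhile_cons, hc]

-- the A-side fold accumulates procA of each part
theorem stepA_eq (acc : List (List Char)) (p : List Char) :
    stepA acc p = acc ++ procA p := by
  unfold stepA procA
  split_ifs <;> simp
  split_ifs <;> simp

theorem foldA_eq (parts : List (List Char)) : ∀ (acc : List (List Char)),
    parts.foldl stepA acc = acc ++ parts.flatMap procA := by
  induction parts with
  | nil => intro acc; simp
  | cons p ps ih =>
    intro acc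
    simp only [List.foldl_cons, stepA_eq, ih, List.flatMap_cons, List.append_assoc]

-- bracket-state buffers always start with '['; phrase the bracket claim with buf = '[' :: t
theorem scanB_spec : ∀ (cs : List Char),
    (∀ buf toks, '[' ∉ buf → '.' ∉ buf →
        scanB cs buf false toks = toks ++ (dotSplit cs buf).flatMap procA) ∧
    (∀ t toks,
        scanB cs ('[' :: t) true toks =
          toks ++ [('[' :: t) ++ cs.takeWhile (· ≠ '.')] ++
            (match cs.dropWhile (· ≠ '.') with
              | [] => []
              | _ :: v => (dotSplit v []).flatMap procA)) := by
  intro cs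
  induction cs with
  | nil =>
    constructor
    · intro buf toks hb hd
      simp only [scanB, dotSplit, List.flatMap_cons, List.flatMap_nil, List.append_nil]
      rw [procA_no_bracket buf hb]
      rcases buf with _ | _ <;> simp
    · intro t toks
      simp [scanB, List.takeWhile, List.dropWhile]
  | cons c rest ih =>
    obtain ⟨ihF, ihB⟩ := ih
    constructor
    · intro buf toks hb hd
      rw [scanB]
      simp only [Bool.false_eq_true, if_false]
      by_cases hc : c = '.'
      · rw [if_pos hc, ihF [] _ (by simp) (by simp)]
        rw [dotSplit, if_pos hc]
        simp only [List.flatMap_cons]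
        rw [procA_no_bracket buf hb]
        rcases buf with _ | _ <;> simp
      · rw [if_neg hc]
        by_cases hc2 : c = '['
        · rw [if_pos hc2, ihB [] _]
          rw [dotSplit, if_neg hc]
          rw [dotSplit_head rest (buf ++ [c])]
          simp only [List.flatMap_cons]
          subst hc2
          have hcat : buf ++ ['['] ++ rest.takeWhile (· ≠ '.') = buf ++ '[' :: rest.takeWhile (· ≠ '.') := by simp
          rw [hcat, procA_bracket buf _ hb]
          have hmatch : ((match rest.dropWhile (· ≠ '.') with
              | [] => ([] : List (List Char))
              | _ :: v => dotSplit v []).flatMap procA) =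
              (match rest.dropWhile (· ≠ '.') with
              | [] => ([] : List (List Char))
              | _ :: v => (dotSplit v []).flatMap procA) := by
            cases rest.dropWhile (· ≠ '.') <;> simp
          rw [hmatch]
          rcases buf with _ | _ <;> simp
        · rw [if_neg hc2]
          rw [ihF (buf ++ [c]) _
                (by
                  simp only [List.mem_append, List.mem_singleton, not_or]
                  exact ⟨hb, fun hh => hc2 hh.symm⟩)
                (by
                  simp only [List.mem_append, List.mem_singleton, not_or]
                  exact ⟨hd, fun hh => hc hh.symm⟩)]
          rw [dotSplit, if_neg hc]
    · intro t toks
      rw [scanB]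
      simp only [if_pos rfl]
      by_cases hc : c = '.'
      · rw [if_pos hc, ihF [] _ (by simp) (by simp)]
        rw [List.takeWhile_cons_of_neg (by simp [hc]), List.dropWhile_cons_of_neg (by simp [hc])]
        simp
      · rw [if_neg hc]
        have hcons : ('[' :: t) ++ [c] = '[' :: (t ++ [c]) := by simp
        rw [hcons, ihB (t ++ [c]) _]
        rw [List.takeWhile_cons_of_pos (by simp [hc]), List.dropWhile_cons_of_pos (by simp [hc])]
        simp


-- ===== VERDICT (by name: the statement is the Claim_ definition above) =====
theorem tokenize_path_py_spec : Claim_equal_tokenize_path_py := by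
  intro path _
  unfold Spec_tokenize_path_py tokenize_path_py tokenize_path_py_alt
  rw [splitOn_eq_dotSplit, foldA_eq]
  rw [(scanB_spec path.toList).1 [] [] (by simp) (by simp)]
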